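-- pv_equiv track=rewrite | github.com/mogomaa79/regula_doc_reader_py | main.py | _merge_universal
-- ===== SOURCE A (Python) =====
-- from typing import List, Dict
--
-- def _merge_universal(records: List[Dict[str, str]]) -> Dict[str, str]:
--     out: Dict[str, str] = {}
--     keys = set().union(*[r.keys() for r in records]) if records else set()
--     for k in keys:
--         vals = [str((r.get(k) or "")).strip() for r in records]
--         # special-case MRZ lines: prefer the longest line
--         if k in ("mrzLine1", "mrzLine2"):
--             out[k] = max(vals, key=lambda s: len(s)) if any(vals) else ""
--         else:
--             # first non-empty value
--             out[k] = next((v for v in vals if v), "")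
--     return out
-- ===== SOURCE B (Python) =====
-- from typing import List, Dict
--
-- def _merge_universal(records: List[Dict[str, str]]) -> Dict[str, str]:
--     # Single pass over records in order, updating per-key state incrementally.
--     out: Dict[str, str] = {}
--     for r in records:
--         for k, v in r.items():
--             v = str(v or "").strip()
--             if k in ("mrzLine1", "mrzLine2"):
--                 if k not in out or len(v) > len(out[k]):
--                     out[k] = v
--             else:
--                 if k not in out or not out[k]:
--                     out[k] = v
--     return out
-- ===== Notes on version B (the rewrite author's own statement) =====
-- stated objective: faster
-- what changed: A collects the union of all keys and then, for every key, rescans the whole record list to build the per-key value list; B makes a single pass over the records, updating per-key running state (longest-so-far for MRZ lines, first-non-empty otherwise) so each entry is touched once.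
import Mathlib
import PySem

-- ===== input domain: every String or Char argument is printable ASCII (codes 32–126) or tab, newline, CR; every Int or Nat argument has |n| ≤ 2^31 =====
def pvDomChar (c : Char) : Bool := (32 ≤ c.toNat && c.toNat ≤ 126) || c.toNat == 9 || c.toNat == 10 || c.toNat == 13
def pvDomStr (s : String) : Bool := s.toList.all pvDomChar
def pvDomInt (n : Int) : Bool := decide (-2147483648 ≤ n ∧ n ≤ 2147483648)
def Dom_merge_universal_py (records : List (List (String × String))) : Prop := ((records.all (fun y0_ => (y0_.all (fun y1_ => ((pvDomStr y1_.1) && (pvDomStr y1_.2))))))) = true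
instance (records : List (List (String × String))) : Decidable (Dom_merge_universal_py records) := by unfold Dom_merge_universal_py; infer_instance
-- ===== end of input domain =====

-- B replaces A's per-key rescans of the whole record list by one incremental pass over the records (objective: faster).


-- ===== PORT A =====
-- Python iterates the key SET in unspecified hash order; the port uses first-seen order
-- (the output is a dict, compared ignoring order).
def merge_universal_py (records : List (List (String × String))) : List (String × String) :=
  let keys : PySem.Set String :=
    if records.isEmpty then PySem.Set.empty
    else PySem.Set.ofList (records.flatMap (fun r => (PySem.Dict.mk r).keys))
  let out : PySem.Dict String String :=
    keys.foldl (fun out k =>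
      let vals := records.map (fun r => PySem.Str.strip (((PySem.Dict.mk r).get? k).getD ""))
      if k == "mrzLine1" || k == "mrzLine2" then
        out.insert k (if vals.any (fun v => !(v == "")) then
            (PySem.List.max? vals (fun s => PySem.Str.len s)).getD "" else "")
      else
        out.insert k ((vals.find? (fun v => !(v == ""))).getD "")) PySem.Dict.empty
  out.items

-- ===== PORT B =====
-- the body of B's inner loop (one (k, v) entry of one record)
def pvStepB (out : PySem.Dict String String) (kv : String × String) : PySem.Dict String String :=
  let k := kv.1
  let v := PySem.Str.strip (if kv.2 == "" then "" else kv.2)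
  if k == "mrzLine1" || k == "mrzLine2" then
    match out.get? k with
    | none => out.insert k v
    | some old => if PySem.Str.len old < PySem.Str.len v then out.insert k v else out
  else
    match out.get? k with
    | none => out.insert k v
    | some old => if old == "" then out.insert k v else out

def merge_universal_py_alt (records : List (List (String × String))) : List (String × String) :=
  (records.foldl (fun out r => r.foldl pvStepB out) PySem.Dict.empty).items

-- ===== PRECONDITION & SPEC =====
-- Pre_ requires each record's keys to be pairwise distinct: a record is a Python dict, which
-- cannot hold duplicate keys, so duplicate-key association lists represent no input A accepts.
def Pre_merge_universal_py (records : List (List (String × String))) : Prop :=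
  ∀ r ∈ records, (r.map Prod.fst).Nodup
instance (records : List (List (String × String))) : Decidable (Pre_merge_universal_py records) := by unfold Pre_merge_universal_py; infer_instance

def pvWitness_merge_universal_py : (List (List (String × String))) :=
  [[("mrzLine1", "AB<"), ("name", "")], [("mrzLine1", "ABCD<"), ("name", "Ann")]]

def Spec_merge_universal_py (records : List (List (String × String))) (out : List (String × String)) : Prop := out = merge_universal_py_alt records
instance (records : List (List (String × String))) (out : List (String × String)) : Decidable (Spec_merge_universal_py records out) := by unfold Spec_merge_universal_py; infer_instance

-- ===== CLAIM (what is proved, stated in full; the proofs are below) =====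
def Claim_equal_merge_universal_py : Prop := ∀ (records : List (List (String × String))), Dom_merge_universal_py records → Pre_merge_universal_py records → Spec_merge_universal_py records (merge_universal_py records)

-- ===== LEMMAS AND PROOFS =====

-- k is one of the two MRZ keys
def pvMrz (k : String) : Bool := k == "mrzLine1" || k == "mrzLine2"

-- A's per-key value
def pvVal (records : List (List (String × String))) (k : String) : String :=
  if pvMrz k then
    (if (records.map (fun r => PySem.Str.strip (((PySem.Dict.mk r).get? k).getD ""))).any (fun v => !(v == "")) then
      (PySem.List.max? (records.map (fun r => PySem.Str.strip (((PySem.Dict.mk r).get? k).getD ""))) (fun s => PySem.Str.len s)).getD "" else "")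
  else
    ((records.map (fun r => PySem.Str.strip (((PySem.Dict.mk r).get? k).getD ""))).find? (fun v => !(v == ""))).getD ""

-- B's update of an existing per-key value
def pvComb (k old w : String) : String :=
  if pvMrz k then (if PySem.Str.len old < PySem.Str.len w then w else old)
  else (if old == "" then w else old)

-- first-seen key order
def pvKeys (records : List (List (String × String))) : List String :=
  PySem.Set.ofList (records.flatMap (fun r => (PySem.Dict.mk r).keys))

lemma pv_ite_self (v : String) : (if v == "" then "" else v) = v := by
  by_cases h : v = "" <;> simp [h]

lemma pvA_items (records : List (List (String × String))) :
    merge_universal_py records = (pvKeys records).map (fun k => (k, pvVal records k)) := by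
  rcases records with _ | ⟨r, rs⟩
  · rfl
  · show (List.foldl _ PySem.Dict.empty (pvKeys (r :: rs))).items = _
    have hbody : (fun (out : PySem.Dict String String) k =>
        let vals := (r :: rs).map (fun r => PySem.Str.strip (((PySem.Dict.mk r).get? k).getD ""))
        if k == "mrzLine1" || k == "mrzLine2" then
          out.insert k (if vals.any (fun v => !(v == "")) then
              (PySem.List.max? vals (fun s => PySem.Str.len s)).getD "" else "")
        else
          out.insert k ((vals.find? (fun v => !(v == ""))).getD ""))
        = fun (out : PySem.Dict String String) k => out.insert k (pvVal (r :: rs) k) := by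
      funext out k
      by_cases h : (k == "mrzLine1" || k == "mrzLine2") = true <;> simp [pvVal, pvMrz, h]
    rw [hbody, PySem.Dict.items_foldl_insert_fresh (pvKeys (r :: rs)) (fun a => a)
        (fun a => pvVal (r :: rs) a) PySem.Dict.empty
        (fun a _ => PySem.Dict.contains_empty a)
        (by simpa using PySem.Set.nodup_ofList _)]
    rfl

lemma pvStep_items_some (d : PySem.Dict String String) (p : String × String) {old : String}
    (hnd : d.keys.Nodup) (h : d.get? p.1 = some old) :
    (pvStepB d p).items
      = d.items.map (fun q => if q.1 == p.1 then (q.1, pvComb q.1 q.2 (PySem.Str.strip p.2)) else q) := by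
  have hc : d.contains p.1 = true := by
    rw [← Bool.not_eq_false, ← PySem.Dict.get?_eq_none_iff_contains, h]; simp
  have hq2 : ∀ q ∈ d.items, q.1 = p.1 → q.2 = old := by
    intro q hq hq1
    have := PySem.Dict.get?_of_mem_items d (k := q.1) (v := q.2) (by simpa using hq) hnd
    rw [hq1, h] at this; exact (Option.some.injEq _ _ ▸ this).symm
  simp only [pvStepB, pv_ite_self, h]
  by_cases hm : (p.1 == "mrzLine1" || p.1 == "mrzLine2") = true
  · simp only [hm, if_true]
    split
    next hcond =>
      rw [PySem.Dict.items_insert_of_contains d _ hc]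
      apply List.map_congr_left
      rintro ⟨a, b⟩ hq
      by_cases h1 : a = p.1
      · subst h1
        have hb := hq2 _ hq rfl; subst hb
        simp [pvComb, pvMrz, hm]
        simp [PySem.Str.len_eq, PySem.Str.strip] at hcond ⊢
        omega
      · simp [h1]
    next hcond =>
      conv_lhs => rw [(List.map_id d.items).symm]
      apply List.map_congr_left
      rintro ⟨a, b⟩ hq
      by_cases h1 : a = p.1
      · subst h1
        have hb := hq2 _ hq rfl; subst hb
        simp [pvComb, pvMrz, hm]
        simp [PySem.Str.len_eq, PySem.Str.strip] at hcond ⊢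
        omega
      · simp [h1]
  · rw [Bool.not_eq_true] at hm
    simp only [hm, Bool.false_eq_true, if_false]
    split
    next hcond =>
      rw [PySem.Dict.items_insert_of_contains d _ hc]
      apply List.map_congr_left
      rintro ⟨a, b⟩ hq
      by_cases h1 : a = p.1
      · subst h1
        have hb := hq2 _ hq rfl; subst hb
        simp [pvComb, pvMrz, hm, hcond]
      · simp [h1]
    next hcond =>
      conv_lhs => rw [(List.map_id d.items).symm]
      apply List.map_congr_left
      rintro ⟨a, b⟩ hq
      by_cases h1 : a = p.1
      · subst h1
        have hb := hq2 _ hq rfl; subst hb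
        simp [pvComb, pvMrz, hm, hcond]
      · simp [h1]

lemma pvStep_items_none (d : PySem.Dict String String) (p : String × String)
    (h : d.get? p.1 = none) :
    (pvStepB d p).items = d.items ++ [(p.1, PySem.Str.strip p.2)] := by
  have hc : d.contains p.1 = false := (PySem.Dict.get?_eq_none_iff_contains d p.1).mp h
  simp only [pvStepB, pv_ite_self, h]
  by_cases hm : (p.1 == "mrzLine1" || p.1 == "mrzLine2") = true
  · simp only [hm, if_true]
    exact PySem.Dict.items_insert_of_not_contains d _ hc
  · rw [Bool.not_eq_true] at hm
    simp only [hm, Bool.false_eq_true, if_false]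
    exact PySem.Dict.items_insert_of_not_contains d _ hc

-- F r: how one record r updates an existing item
def pvUpd (r : List (String × String)) (p : String × String) : String × String :=
  (p.1, match (PySem.Dict.mk r).get? p.1 with
        | none => p.2
        | some v => pvComb p.1 p.2 (PySem.Str.strip v))

lemma pvContains_of_items {d d' : PySem.Dict String String} (h : d'.items = d.items ++ [q])
    (x : String) : d'.contains x = (d.contains x || (q.1 == x)) := by
  simp [PySem.Dict.contains, h]

lemma pvInner (r : List (String × String)) (hr : (r.map Prod.fst).Nodup) :
    ∀ (d : PySem.Dict String String), d.keys.Nodup →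
    (r.foldl pvStepB d).items
      = d.items.map (pvUpd r)
        ++ (r.filter (fun p => !(d.contains p.1))).map (fun p => (p.1, PySem.Str.strip p.2)) := by
  induction r with
  | nil =>
    intro d _
    have hid : d.items.map (pvUpd []) = d.items := by
      apply List.map_congr_left (g := id) (fun q _ => by simp [pvUpd, PySem.Dict.get?]) |>.trans
      exact List.map_id d.items
    simp [hid]
  | cons p rest ih =>
    obtain ⟨pk, pw⟩ := p
    intro d hnd
    have hp1 : pk ∉ rest.map Prod.fst := (List.nodup_cons.mp (by simpa using hr)).1
    have hrest : (rest.map Prod.fst).Nodup := (List.nodup_cons.mp (by simpa using hr)).2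
    have hget_rest_p : (PySem.Dict.mk rest).get? pk = none := by
      rw [PySem.Dict.get?_eq_none_iff_not_mem_keys]; simpa using hp1
    simp only [List.foldl_cons]
    cases hg : d.get? pk with
    | none =>
      have hcF : d.contains pk = false := (PySem.Dict.get?_eq_none_iff_contains d pk).mp hg
      have hpk : pk ∉ d.keys := (PySem.Dict.get?_eq_none_iff_not_mem_keys d pk).mp hg
      have hitems : (pvStepB d (pk, pw)).items = d.items ++ [(pk, PySem.Str.strip pw)] :=
        pvStep_items_none d (pk, pw) hg
      have hnd' : (pvStepB d (pk, pw)).keys.Nodup := by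
        have hk : (pvStepB d (pk, pw)).keys = d.keys ++ [pk] := by
          simp [PySem.Dict.keys, hitems]
        rw [hk]
        simp [List.nodup_append, hnd]
        intro a ha hEq; exact hpk (hEq ▸ ha)
      rw [ih hrest _ hnd']
      have hmap : (pvStepB d (pk, pw)).items.map (pvUpd rest)
          = d.items.map (pvUpd ((pk, pw) :: rest)) ++ [(pk, PySem.Str.strip pw)] := by
        rw [hitems, List.map_append]
        congr 1
        · apply List.map_congr_left
          rintro ⟨a, b⟩ hq
          have ha : a ≠ pk := by
            intro hEq; subst hEq
            exact hpk (by simpa [PySem.Dict.keys] using List.mem_map_of_mem hq (f := Prod.fst))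
          simp [pvUpd, PySem.Dict.get?_mk_cons, (by simpa using (Ne.symm ha) : (pk == a) = false)]
        · simp [pvUpd, hget_rest_p]
      have hfil : rest.filter (fun q => !((pvStepB d (pk, pw)).contains q.1))
          = rest.filter (fun q => !(d.contains q.1)) := by
        apply List.filter_congr
        intro x hx
        have hx1 : x.1 ≠ pk := by
          intro hEq; exact hp1 (hEq ▸ List.mem_map_of_mem hx (f := Prod.fst))
        rw [pvContains_of_items hitems]
        simp [(by simpa using (Ne.symm hx1) : (pk == x.1) = false)]
      rw [hmap, hfil]
      simp [hcF, List.append_assoc]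
    | some old =>
      have hcT : d.contains pk = true := by
        rw [← Bool.not_eq_false, ← PySem.Dict.get?_eq_none_iff_contains, hg]; simp
      have hitems := pvStep_items_some d (pk, pw) hnd hg
      have hkeys : (pvStepB d (pk, pw)).keys = d.keys := by
        simp only [PySem.Dict.keys, hitems, List.map_map]
        apply List.map_congr_left
        intro q _
        by_cases h1 : q.1 = pk <;> simp [Function.comp, h1]
      have hnd' : (pvStepB d (pk, pw)).keys.Nodup := by rw [hkeys]; exact hnd
      rw [ih hrest _ hnd']
      have hmap : (pvStepB d (pk, pw)).items.map (pvUpd rest)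
          = d.items.map (pvUpd ((pk, pw) :: rest)) := by
        rw [hitems, List.map_map]
        apply List.map_congr_left
        rintro ⟨a, b⟩ hq
        by_cases h1 : a = pk
        · subst h1
          simp [Function.comp, pvUpd, hget_rest_p, PySem.Dict.get?_mk_cons]
        · simp [Function.comp, h1, pvUpd, PySem.Dict.get?_mk_cons,
            (by simpa using (Ne.symm h1) : (pk == a) = false)]
      have hcon : ∀ x, (pvStepB d (pk, pw)).contains x = d.contains x := by
        intro x
        simp only [PySem.Dict.contains, hitems, List.any_map]
        apply List.any_congr rfl
        intro q
        by_cases h1 : q.1 = pk <;> simp [Function.comp, h1]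
      have hfil : rest.filter (fun q => !((pvStepB d (pk, pw)).contains q.1))
          = rest.filter (fun q => !(d.contains q.1)) := by
        apply List.filter_congr; intro x _; rw [hcon]
      rw [hmap, hfil]
      simp [hcT]

-- max(_, key=len) over one more element
lemma pvMaxStep {κ : Type} [LT κ] [DecidableLT κ] (vs : List String) (w : String) (key : String → κ) :
    PySem.List.max? (vs ++ [w]) key = match PySem.List.max? vs key with
      | none => some w
      | some m => if key m < key w then some w else some m := by
  cases h : PySem.List.max? vs key with
  | none =>
    simp only [PySem.List.max?] at h ⊢
    rw [List.foldl_append, h]; rfl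
  | some m =>
    simp only [PySem.List.max?] at h ⊢
    rw [List.foldl_append, h]; rfl

-- on a nonempty list the any-guard in A's MRZ branch is redundant
lemma pvMrzGuard (vs : List String) (h : vs ≠ []) :
    (if vs.any (fun v => !(v == "")) then
      (PySem.List.max? vs (fun s => PySem.Str.len s)).getD "" else "")
    = (PySem.List.max? vs (fun s => PySem.Str.len s)).getD "" := by
  by_cases ha : vs.any (fun v => !(v == "")) = true
  · rw [if_pos ha]
  · rw [if_neg ha]
    have hall : ∀ v ∈ vs, v = "" := by
      intro v hv
      by_contra hne
      apply ha
      rw [List.any_eq_true]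
      exact ⟨v, hv, by simpa using hne⟩
    cases hmax : PySem.List.max? vs (fun s => PySem.Str.len s) with
    | none => exact absurd ((PySem.List.max?_eq_none_iff _ _).mp hmax) h
    | some m => rw [hall m (PySem.List.max?_mem hmax)]; rfl

lemma pvLenPos (w : String) (h : w ≠ "") : 0 < PySem.Str.len w := by
  simp only [PySem.Str.len_eq]
  have hnil : w.toList ≠ [] := fun hnil => h (String.toList_eq_nil_iff.mp hnil)
  exact_mod_cast List.length_pos_iff.mpr hnil

-- max over an all-empty nonempty list is ""
lemma pvMaxConst (vs : List String) (h : vs ≠ []) (he : ∀ v ∈ vs, v = "") :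
    PySem.List.max? vs (fun s => PySem.Str.len s) = some "" := by
  cases hmax : PySem.List.max? vs (fun s => PySem.Str.len s) with
  | none => exact absurd ((PySem.List.max?_eq_none_iff _ _).mp hmax) h
  | some m => rw [he m (PySem.List.max?_mem hmax)]

lemma pvStepOld (rs : List (List (String × String))) (r : List (String × String))
    (k : String) (hk : k ∈ pvKeys rs) :
    (match (PySem.Dict.mk r).get? k with
      | none => pvVal rs k
      | some v => pvComb k (pvVal rs k) (PySem.Str.strip v)) = pvVal (rs ++ [r]) k := by
  have hvne : rs.map (fun r' => PySem.Str.strip (((PySem.Dict.mk r').get? k).getD "")) ≠ [] := by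
    intro hnil
    rw [List.map_eq_nil_iff] at hnil
    subst hnil
    simp [pvKeys, PySem.Set.ofList] at hk
  have hstrip : PySem.Str.strip "" = "" := rfl
  cases hg : (PySem.Dict.mk r).get? k with
  | none =>
    unfold pvVal
    simp only [List.map_append, List.map_cons, List.map_nil, hg, Option.getD_none, hstrip]
    by_cases hm : pvMrz k = true
    · simp only [hm, if_true]
      rw [pvMrzGuard _ hvne, pvMrzGuard _ (by simp), pvMaxStep]
      cases hmax : PySem.List.max? (rs.map (fun r' => PySem.Str.strip (((PySem.Dict.mk r').get? k).getD ""))) (fun s => PySem.Str.len s) with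
      | none => exact absurd ((PySem.List.max?_eq_none_iff _ _).mp hmax) hvne
      | some m =>
        simp [PySem.Str.len_eq]
        rw [if_neg (by omega)]
        rfl
    · rw [Bool.not_eq_true] at hm
      simp only [hm, Bool.false_eq_true, if_false, List.find?_append]
      cases hf : (rs.map (fun r' => PySem.Str.strip (((PySem.Dict.mk r').get? k).getD ""))).find? (fun v => !(v == "")) with
      | none => simp [List.find?]
      | some u => simp
  | some v =>
    unfold pvVal pvComb
    simp only [List.map_append, List.map_cons, List.map_nil, hg, Option.getD_some]
    by_cases hm : pvMrz k = true
    · simp only [hm, if_true]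
      rw [pvMrzGuard _ hvne, pvMrzGuard _ (by simp), pvMaxStep]
      cases hmax : PySem.List.max? (rs.map (fun r' => PySem.Str.strip (((PySem.Dict.mk r').get? k).getD ""))) (fun s => PySem.Str.len s) with
      | none => exact absurd ((PySem.List.max?_eq_none_iff _ _).mp hmax) hvne
      | some m =>
        simp only [Option.getD_some]
        by_cases hlt : PySem.Str.len m < PySem.Str.len (PySem.Str.strip v)
        · rw [if_pos hlt, if_pos hlt]; rfl
        · rw [if_neg hlt, if_neg hlt]; rfl
    · rw [Bool.not_eq_true] at hm
      simp only [hm, Bool.false_eq_true, if_false, List.find?_append]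
      cases hf : (rs.map (fun r' => PySem.Str.strip (((PySem.Dict.mk r').get? k).getD ""))).find? (fun v => !(v == "")) with
      | none =>
        by_cases hv0 : PySem.Str.strip v = ""
        · simp [List.find?, hv0]
        · have hbe : (PySem.Str.strip v == "") = false := by simp [hv0]
          simp [List.find?, hbe]
      | some u =>
        have hu : ¬ u = "" := by
          have := List.find?_some hf
          simpa using this
        simp [hu]

lemma pvStepNew (rs : List (List (String × String))) (r : List (String × String))
    (k : String) (v : String) (hk : k ∉ pvKeys rs) (hv : (PySem.Dict.mk r).get? k = some v) :
    pvVal (rs ++ [r]) k = PySem.Str.strip v := by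
  have hall : ∀ r' ∈ rs, (PySem.Dict.mk r').get? k = none := by
    intro r' hr'
    rw [PySem.Dict.get?_eq_none_iff_not_mem_keys]
    intro hmem
    exact hk (by
      simp only [pvKeys, PySem.Set.mem_ofList, List.mem_flatMap]
      exact ⟨r', hr', hmem⟩)
  have hconst : rs.map (fun r' => PySem.Str.strip (((PySem.Dict.mk r').get? k).getD ""))
      = rs.map (fun _ => "") := by
    apply List.map_congr_left
    intro r' hr'
    rw [hall r' hr']; rfl
  unfold pvVal
  simp only [List.map_append, List.map_cons, List.map_nil, hv, Option.getD_some, hconst]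
  by_cases hm : pvMrz k = true
  · simp only [hm, if_true]
    by_cases hv0 : PySem.Str.strip v = ""
    · rw [hv0]
      rw [if_neg (by simp)]
    · rw [if_pos (by simp [hv0])]
      rw [pvMaxStep]
      rcases rs with _ | ⟨r0, rs'⟩
      · simp [PySem.List.max?]
      · rw [pvMaxConst _ (by simp) (by simp)]
        show (if PySem.Str.len "" < PySem.Str.len (PySem.Str.strip v) then some (PySem.Str.strip v)
            else some "").getD "" = PySem.Str.strip v
        rw [show PySem.Str.len "" = 0 from rfl, if_pos (pvLenPos _ hv0)]
        rfl
  · rw [Bool.not_eq_true] at hm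
    simp only [hm, Bool.false_eq_true, if_false, List.find?_append]
    have hfn : (rs.map (fun (_ : List (String × String)) => "")).find? (fun v => !(v == "")) = none := by
      rw [List.find?_eq_none]
      intro x hx
      simp at hx
      simp [hx]
    rw [hfn]
    by_cases hv0 : PySem.Str.strip v = ""
    · simp [List.find?, hv0]
    · have hbe : (PySem.Str.strip v == "") = false := by simp [hv0]
      simp [List.find?, hbe]

lemma pvB_items (records : List (List (String × String))) (h : Pre_merge_universal_py records) :
    merge_universal_py_alt records = (pvKeys records).map (fun k => (k, pvVal records k)) := by
  unfold merge_universal_py_alt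
  induction records using List.reverseRecOn with
  | nil => rfl
  | append_singleton rs r ih =>
    have hpre_rs : Pre_merge_universal_py rs := fun r' hr' => h r' (List.mem_append_left _ hr')
    have hr : (r.map Prod.fst).Nodup := h r (List.mem_append_right _ (List.mem_singleton_self r))
    have hD := ih hpre_rs
    set D := rs.foldl (fun out r => r.foldl pvStepB out) PySem.Dict.empty with hDdef
    have hDkeys : D.keys = pvKeys rs := by
      show D.items.map Prod.fst = _
      rw [hD, List.map_map]
      exact (List.map_congr_left (fun k _ => rfl)).trans (List.map_id _)
    have hnd : D.keys.Nodup := by rw [hDkeys]; exact PySem.Set.nodup_ofList _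
    rw [List.foldl_append, List.foldl_cons, List.foldl_nil]
    rw [pvInner r hr D hnd]
    -- the updated old entries
    have hOld : D.items.map (pvUpd r)
        = (pvKeys rs).map (fun k => (k, pvVal (rs ++ [r]) k)) := by
      rw [hD, List.map_map]
      apply List.map_congr_left
      intro k hk
      show pvUpd r (k, pvVal rs k) = _
      unfold pvUpd
      simp only []
      rw [pvStepOld rs r k hk]
    -- the appended new entries
    have hContains : ∀ (x : String), D.contains x = decide (x ∈ pvKeys rs) := by
      intro x
      rw [PySem.Dict.contains_eq_decide_mem_keys, hDkeys]
    have hNewVals : (r.filter (fun p => !(D.contains p.1))).map (fun p => (p.1, PySem.Str.strip p.2))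
        = (r.filter (fun p => !(D.contains p.1))).map (fun p => (p.1, pvVal (rs ++ [r]) p.1)) := by
      apply List.map_congr_left
      intro p hp
      have hmem : p ∈ r := (List.mem_filter.mp hp).1
      have hnotin : p.1 ∉ pvKeys rs := by
        have := (List.mem_filter.mp hp).2
        rw [hContains] at this
        simpa using this
      have hget : (PySem.Dict.mk r).get? p.1 = some p.2 :=
        PySem.Dict.get?_of_mem_items (PySem.Dict.mk r) (by simpa using hmem) (by simpa using hr)
      rw [pvStepNew rs r p.1 p.2 hnotin hget]
    -- the key list of rs ++ [r]
    have hKeys : pvKeys (rs ++ [r]) = pvKeys rs ++ (r.filter (fun p => !(D.contains p.1))).map Prod.fst := by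
      unfold pvKeys
      rw [List.flatMap_append]
      have : (List.flatMap (fun r => (PySem.Dict.mk r).keys) [r]) = r.map Prod.fst := by
        simp [PySem.Dict.keys]
      rw [this, PySem.Set.ofList_append, PySem.Set.update_eq_append_filter,
        PySem.Set.ofList_eq_self_of_nodup _ hr]
      congr 1
      rw [List.filter_map]
      congr 1
      apply List.filter_congr
      intro p _
      simp only [Function.comp_apply, hContains]
      rw [PySem.Set.contains_eq_listContains, List.contains_eq_mem]
      rfl
    rw [hOld, hNewVals, hKeys, List.map_append, List.map_map]
    congr 1

-- ===== VERDICT (by name: the statement is the Claim_ definition above) =====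
theorem merge_universal_py_spec : Claim_equal_merge_universal_py := by
  intro records _ hpre
  unfold Spec_merge_universal_py
  rw [pvA_items records, pvB_items records hpre]
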